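-- pv_equiv track=rewrite | github.com/juanauli/Inversion-Sequences-Consecutive-Patterns-of-Length-4 | consec_detect4.py | detect0111
-- ===== SOURCE A (Python) =====
-- def detect0111(sequence):
--     index = 0
--     while index < len(sequence) - 3:
--         if sequence[index + 1] == sequence[index + 2] == sequence[index + 3] >\
--                 sequence[index]:
--             return True
--         index += 1
--     return False
-- ===== SOURCE B (Python) =====
-- def detect0111(sequence):
--     # Single pass tracking run length of equal consecutive elements and the
--     # element just before the current run, instead of a 4-wide window re-read.
--     run = 1
--     prev = None
--     for i in range(1, len(sequence)):
--         if sequence[i] == sequence[i - 1]: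
--             run += 1
--         else:
--             run = 1
--             prev = sequence[i - 1]
--         if run == 3 and prev is not None and prev < sequence[i]:
--             return True
--     return False
-- ===== Notes on version B (the rewrite author's own statement) =====
-- stated objective: alternative
-- what changed: Replaced A's 4-wide sliding-window re-read at every index (three comparisons and four element reads per position) by a single forward pass that maintains the length of the current run of equal consecutive elements and the element just before that run, firing exactly when a run reaches length 3 with a strictly smaller predecessor (one comparison per position).
import Mathlib
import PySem

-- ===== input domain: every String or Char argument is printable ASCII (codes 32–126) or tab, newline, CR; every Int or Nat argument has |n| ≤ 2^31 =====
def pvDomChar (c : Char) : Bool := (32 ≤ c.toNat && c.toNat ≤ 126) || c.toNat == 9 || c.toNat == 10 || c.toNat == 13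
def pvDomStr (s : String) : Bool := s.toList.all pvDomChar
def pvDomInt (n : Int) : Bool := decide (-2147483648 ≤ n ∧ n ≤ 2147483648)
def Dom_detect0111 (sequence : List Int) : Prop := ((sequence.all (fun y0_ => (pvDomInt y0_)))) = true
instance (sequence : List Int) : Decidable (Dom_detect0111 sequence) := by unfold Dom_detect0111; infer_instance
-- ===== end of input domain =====

-- B replaces A's 4-wide sliding-window re-read by a single pass maintaining the
-- run length of equal consecutive elements plus the element before the run
-- (same return value; one comparison per position instead of a window re-read,
-- measured faster in a timing run).

-- ===== PORT A =====
-- while index < len(sequence) - 3 (guard written as index + 3 < len, equal on Nat);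
-- the guard keeps every access in range, so getD is exact here
def detect0111Loop (s : List Int) (index : Nat) : Bool :=
  if index + 3 < s.length then
    if (s.getD (index + 1) 0 == s.getD (index + 2) 0) &&
       (s.getD (index + 2) 0 == s.getD (index + 3) 0) &&
       (s.getD (index + 3) 0 > s.getD index 0) then
      true
    else
      detect0111Loop s (index + 1)
  else
    false
termination_by s.length - index

def detect0111 (sequence : List Int) : Bool := detect0111Loop sequence 0

-- ===== PORT B =====
-- for i in range(1, len(sequence)) with state (run, prev); early return = true;
-- i ≥ 1 at every call, so the i-1 accesses are in range and getD is exact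
def detect0111AltLoop (s : List Int) (i : Nat) (run : Nat) (prev : Option Int) : Bool :=
  if i < s.length then
    let run' := if s.getD i 0 == s.getD (i - 1) 0 then run + 1 else 1
    let prev' := if s.getD i 0 == s.getD (i - 1) 0 then prev else some (s.getD (i - 1) 0)
    if run' == 3 && (match prev' with
                     | some p => decide (p < s.getD i 0)
                     | none => false) then
      true
    else
      detect0111AltLoop s (i + 1) run' prev'
  else
    false
termination_by s.length - i

def detect0111_alt (sequence : List Int) : Bool := detect0111AltLoop sequence 1 1 none

-- ===== PRECONDITION & SPEC =====
def Spec_detect0111 (sequence : List Int) (out : Bool) : Prop := out = detect0111_alt sequence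
instance (sequence : List Int) (out : Bool) : Decidable (Spec_detect0111 sequence out) := by unfold Spec_detect0111; infer_instance

-- ===== CLAIM (what is proved, stated in full; the proofs are below) =====
def Claim_equal_detect0111 : Prop := ∀ (sequence : List Int), Dom_detect0111 sequence → Spec_detect0111 sequence (detect0111 sequence)

-- ===== LEMMAS AND PROOFS =====

-- a "0111 window" at k: s[k+1] = s[k+2] = s[k+3] > s[k]
def PvWin (s : List Int) (k : Nat) : Prop :=
  k + 3 < s.length ∧ s.getD (k + 1) 0 = s.getD (k + 2) 0 ∧
  s.getD (k + 2) 0 = s.getD (k + 3) 0 ∧ s.getD k 0 < s.getD (k + 3) 0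

-- invariant of B's loop state: run is the exact length of the equal run ending
-- at index i-1, prev the element just before that run (none iff the run starts at 0)
def PvInv (s : List Int) (i run : Nat) (prev : Option Int) : Prop :=
  1 ≤ i ∧ 1 ≤ run ∧ run ≤ i ∧
  (∀ t, t < run → s.getD (i - 1 - t) 0 = s.getD (i - 1) 0) ∧
  (if run = i then prev = none
   else prev = some (s.getD (i - 1 - run) 0) ∧ s.getD (i - 1 - run) 0 ≠ s.getD (i - run) 0)

theorem pvLoopA_iff (s : List Int) (index : Nat) :
    detect0111Loop s index = true ↔ ∃ k, index ≤ k ∧ PvWin s k := by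
  induction index using detect0111Loop.induct s with
  | case1 index hlt hcond =>
      rw [detect0111Loop, if_pos hlt, if_pos hcond]
      simp only [beq_iff_eq, Bool.and_eq_true, decide_eq_true_eq] at hcond
      exact ⟨fun _ => ⟨index, le_refl _, hlt, hcond.1.1, hcond.1.2, by omega⟩, fun _ => rfl⟩
  | case2 index hlt hcond ih =>
      rw [detect0111Loop, if_pos hlt, if_neg hcond]
      rw [ih]
      constructor
      · rintro ⟨k, hk, hw⟩; exact ⟨k, by omega, hw⟩
      · rintro ⟨k, hk, hw⟩
        refine ⟨k, ?_, hw⟩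
        rcases Nat.lt_or_ge index k with h | h
        · omega
        · exfalso
          have : k = index := by omega
          subst this
          obtain ⟨_, h1, h2, h3⟩ := hw
          apply hcond
          simp only [Bool.and_eq_true, beq_iff_eq, decide_eq_true_eq]
          exact ⟨⟨h1, h2⟩, h3⟩
  | case3 index hlt =>
      rw [detect0111Loop, if_neg hlt]
      simp only [Bool.false_eq_true, false_iff]
      rintro ⟨k, hk, hw, -⟩
      exact hlt (by omega)

theorem pvStep (s : List Int) (i : Nat) (h3 : 3 ≤ i → ¬ PvWin s (i - 3)) :
    (∃ k, i + 1 ≤ k + 3 ∧ PvWin s k) ↔ (∃ k, i ≤ k + 3 ∧ PvWin s k) := by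
  constructor
  · rintro ⟨k, hk, hw⟩; exact ⟨k, by omega, hw⟩
  · rintro ⟨k, hk, hw⟩
    by_cases h : i + 1 ≤ k + 3
    · exact ⟨k, h, hw⟩
    · exfalso
      have hki : k = i - 3 ∧ 3 ≤ i := by
        have := hw.1; omega
      exact h3 hki.2 (hki.1 ▸ hw)

theorem pvLoopB_fuel (s : List Int) (n : Nat) :
    ∀ i run prev, s.length ≤ i + n → PvInv s i run prev →
    (detect0111AltLoop s i run prev = true ↔ ∃ k, i ≤ k + 3 ∧ PvWin s k) := by
  induction n with
  | zero =>
      intro i run prev hn _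
      rw [detect0111AltLoop, if_neg (by omega)]
      simp only [Bool.false_eq_true, false_iff]
      rintro ⟨k, hk, hlen, -⟩
      omega
  | succ n ih =>
      intro i run prev hn hinv
      by_cases hi : i < s.length
      · obtain ⟨hi1, hr1, hri, heqrun, hprev⟩ := hinv
        rw [detect0111AltLoop, if_pos hi]
        by_cases heq : s.getD i 0 = s.getD (i - 1) 0
        · have hbeq : (s.getD i 0 == s.getD (i - 1) 0) = true := beq_iff_eq.mpr heq
          simp only [hbeq, if_true]
          cases prev with
          | none =>
              rw [if_neg (by simp)]
              have hrun_i : run = i := by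
                by_contra hne
                rw [if_neg hne] at hprev
                cases hprev.1
              have hinv' : PvInv s (i + 1) (run + 1) none := by
                refine ⟨by omega, by omega, by omega, ?_, ?_⟩
                · intro t ht
                  have e : i + 1 - 1 = i := by omega
                  rw [e]
                  rcases Nat.eq_zero_or_pos t with h0 | h0
                  · subst h0; rfl
                  · have e2 : i - t = i - 1 - (t - 1) := by omega
                    rw [e2, heqrun (t - 1) (by omega), heq]
                · rw [if_pos (by omega : run + 1 = i + 1)]
              rw [ih (i + 1) (run + 1) none (by omega) hinv']
              apply pvStep
              intro hi3 hw
              obtain ⟨hlen, h1, h2, h3⟩ := hw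
              have e3 : i - 3 + 3 = i := by omega
              have := heqrun 2 (by omega)
              have e4 : i - 1 - 2 = i - 3 := by omega
              rw [e4] at this
              rw [e3, this, ← heq] at h3
              exact lt_irrefl _ h3
          | some p =>
              have hrun_ne : ¬ (run = i) := by
                intro h
                rw [if_pos h] at hprev
                cases hprev
              rw [if_neg hrun_ne] at hprev
              obtain ⟨hp, hneq⟩ := hprev
              have hpval : p = s.getD (i - 1 - run) 0 := Option.some.inj hp
              by_cases hfire : ((run + 1 == 3) && decide (p < s.getD i 0)) = true
              · rw [if_pos hfire]
                rw [Bool.and_eq_true] at hfire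
                obtain ⟨hf1, hf2⟩ := hfire
                have hrun2 : run = 2 := by have := beq_iff_eq.mp hf1; omega
                subst hrun2
                have hplt : p < s.getD i 0 := of_decide_eq_true hf2
                have hi3 : 3 ≤ i := by omega
                constructor
                · intro _
                  refine ⟨i - 3, by omega, by omega, ?_, ?_, ?_⟩
                  · have e1 : i - 3 + 1 = i - 1 - 1 := by omega
                    have e2 : i - 3 + 2 = i - 1 := by omega
                    rw [e1, e2]
                    exact heqrun 1 (by omega)
                  · have e2 : i - 3 + 2 = i - 1 := by omega
                    have e3 : i - 3 + 3 = i := by omega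
                    rw [e2, e3, heq]
                  · have e3 : i - 3 + 3 = i := by omega
                    have e0 : i - 3 = i - 1 - 2 := by omega
                    rw [e3, e0, ← hpval]
                    exact hplt
                · intro _; rfl
              · rw [if_neg hfire]
                have hinv' : PvInv s (i + 1) (run + 1) (some p) := by
                  refine ⟨by omega, by omega, by omega, ?_, ?_⟩
                  · intro t ht
                    have e : i + 1 - 1 = i := by omega
                    rw [e]
                    rcases Nat.eq_zero_or_pos t with h0 | h0
                    · subst h0; rfl
                    · have e2 : i - t = i - 1 - (t - 1) := by omega
                      rw [e2, heqrun (t - 1) (by omega), heq]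
                  · rw [if_neg (by omega : ¬ (run + 1 = i + 1))]
                    have e1 : i + 1 - 1 - (run + 1) = i - 1 - run := by omega
                    have e2 : i + 1 - (run + 1) = i - run := by omega
                    rw [e1, e2]
                    exact ⟨hp, hneq⟩
                rw [ih (i + 1) (run + 1) (some p) (by omega) hinv']
                apply pvStep
                intro hi3 hw
                obtain ⟨hlen, h1, h2, h3⟩ := hw
                have e1 : i - 3 + 1 = i - 2 := by omega
                have e2 : i - 3 + 2 = i - 1 := by omega
                have e3 : i - 3 + 3 = i := by omega
                rw [e1, e2] at h1
                rw [e2, e3] at h2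
                rw [e3] at h3
                have hrun2 : run = 2 := by
                  rcases Nat.lt_trichotomy run 2 with h | h | h
                  · have hr : run = 1 := by omega
                    subst hr
                    have e4 : i - 1 - 1 = i - 2 := by omega
                    rw [e4] at hneq
                    exact absurd h1 hneq
                  · exact h
                  · exfalso
                    have := heqrun 2 (by omega)
                    have e4 : i - 1 - 2 = i - 3 := by omega
                    rw [e4] at this
                    rw [this, ← heq] at h3
                    exact lt_irrefl _ h3
                subst hrun2
                apply hfire
                rw [Bool.and_eq_true]
                refine ⟨rfl, ?_⟩
                have e0 : i - 1 - 2 = i - 3 := by omega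
                rw [hpval, e0]
                exact decide_eq_true h3
        · have hbeq : (s.getD i 0 == s.getD (i - 1) 0) = false := beq_eq_false_iff_ne.mpr heq
          simp only [hbeq, Bool.false_eq_true, if_false]
          rw [if_neg (by simp)]
          have hinv' : PvInv s (i + 1) 1 (some (s.getD (i - 1) 0)) := by
            refine ⟨by omega, le_refl 1, by omega, ?_, ?_⟩
            · intro t ht
              have : t = 0 := by omega
              subst this; rfl
            · rw [if_neg (by omega : ¬ (1 = i + 1))]
              have e1 : i + 1 - 1 - 1 = i - 1 := by omega
              have e2 : i + 1 - 1 = i := by omega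
              rw [e1, e2]
              exact ⟨rfl, fun h => heq h.symm⟩
          rw [ih (i + 1) 1 (some (s.getD (i - 1) 0)) (by omega) hinv']
          apply pvStep
          intro hi3 hw
          obtain ⟨hlen, h1, h2, h3⟩ := hw
          have e2 : i - 3 + 2 = i - 1 := by omega
          have e3 : i - 3 + 3 = i := by omega
          rw [e2, e3] at h2
          exact heq h2.symm
      · rw [detect0111AltLoop, if_neg hi]
        simp only [Bool.false_eq_true, false_iff]
        rintro ⟨k, hk, hlen, -⟩
        omega

-- ===== VERDICT (by name: the statement is the Claim_ definition above) =====
theorem detect0111_spec : Claim_equal_detect0111 := by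
  intro s _
  unfold Spec_detect0111 detect0111 detect0111_alt
  have hA := pvLoopA_iff s 0
  have hB := pvLoopB_fuel s s.length 1 1 none (by omega) (by
    refine ⟨le_refl 1, le_refl 1, le_refl 1, ?_, by simp⟩
    intro t ht
    have : t = 0 := by omega
    subst this; rfl)
  have hiff : detect0111Loop s 0 = true ↔ detect0111AltLoop s 1 1 none = true := by
    rw [hA, hB]
    constructor
    · rintro ⟨k, -, hw⟩; exact ⟨k, by omega, hw⟩
    · rintro ⟨k, -, hw⟩; exact ⟨k, by omega, hw⟩
  cases h1 : detect0111Loop s 0 <;> cases h2 : detect0111AltLoop s 1 1 none <;> simp_all
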